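-- pv_equiv track=rewrite | github.com/papajoker/aurkonsult | aurkonsult/core.py | denormalize_name_attr
-- ===== SOURCE A (Python) =====
-- def denormalize_name_attr(name: str) -> str:
--     """python class name attribute to aur field name"""
--     if name == "url":
--         return "URL"
--     ret = ""
--     names = list(name)
--     names[0] = names[0].upper()
--     for i, char_name in enumerate(names):
--         if char_name == "_":
--             try:
--                 names[i + 1] = names[i + 1].upper()
--             except IndexError:
--                 pass
--             continue
--         ret = f"{ret}{char_name}"
--     return ret
-- ===== SOURCE B (Python) =====
-- def denormalize_name_attr(name: str) -> str:
--     """python class name attribute to aur field name"""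
--     if name == "url":
--         return "URL"
--     name = name[0].upper() + name[1:]
--     return "".join(p[:1].upper() + p[1:] for p in name.split("_"))
-- ===== Notes on version B (the rewrite author's own statement) =====
-- stated objective: idiomatic
-- what changed: Replaces the index-based scan that mutates the working char list in place and rebuilds the result string one character at a time with split-on-underscore, capitalize each token, join.
-- outside the precondition, e.g. on denormalize_name_attr(''): A raises IndexError, B raises IndexError
import Mathlib
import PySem

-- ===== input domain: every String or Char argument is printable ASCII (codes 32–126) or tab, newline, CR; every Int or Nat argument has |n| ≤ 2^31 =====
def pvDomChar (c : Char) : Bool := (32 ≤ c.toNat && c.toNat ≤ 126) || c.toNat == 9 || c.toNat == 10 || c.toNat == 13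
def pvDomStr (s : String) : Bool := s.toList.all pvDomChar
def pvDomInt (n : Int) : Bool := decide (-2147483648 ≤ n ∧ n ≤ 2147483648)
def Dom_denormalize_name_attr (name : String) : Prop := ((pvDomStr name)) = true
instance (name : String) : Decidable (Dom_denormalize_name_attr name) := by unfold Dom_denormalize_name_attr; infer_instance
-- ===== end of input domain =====

-- B replaces A's index-based scan (which mutates the working char list in place) with
-- split-on-underscore / capitalize-each-token / join; equivalence of return values is proved
-- for every non-empty input (on "" both raise IndexError).

-- ===== PORT A =====
-- try: names[i+1] = names[i+1].upper() except IndexError: pass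
def denormA_setNext (names : List Char) (i : Nat) : List Char :=
  match PySem.List.pyGet? names ((i : Int) + 1) with
  | some d => PySem.List.pySetD names ((i : Int) + 1) (PySem.Chars.upperChar d)
  | none => names

-- needed by the loop's termination proof
theorem denormA_setNext_length (names : List Char) (i : Nat) :
    (denormA_setNext names i).length = names.length := by
  unfold denormA_setNext
  cases h : PySem.List.pyGet? names ((i : Int) + 1) with
  | none => rfl
  | some d =>
      dsimp only
      have h1 : ((i : Int) + 1) = ((i + 1 : Nat) : Int) := by push_cast; ring
      rw [h1, PySem.List.pySetD_natCast]
      exact List.length_set ..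

-- the for-loop over enumerate(names), reading the live (mutated) list
def denormA_loop (names : List Char) (i : Nat) (ret : List Char) : List Char :=
  if h : i < names.length then
    if names[i] = '_' then
      denormA_loop (denormA_setNext names i) (i + 1) ret
    else
      denormA_loop names (i + 1) (ret ++ [names[i]])
  else ret
termination_by names.length - i
decreasing_by
  · rw [denormA_setNext_length]; omega
  · omega

def denormalize_name_attr (name : String) : String :=
  if name = "url" then "URL"
  else
    let names := name.toList
    -- names[0] = names[0].upper()  (IndexError on "" — excluded by Pre_)
    let names := match PySem.List.pyGet? names 0 with
      | some c => PySem.List.pySetD names 0 (PySem.Chars.upperChar c)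
      | none => names
    String.ofList (denormA_loop names 0 [])

-- ===== PORT B =====
-- p[:1].upper() + p[1:]
def denormB_capWord (p : List Char) : List Char :=
  PySem.Chars.upper (PySem.List.slice p none (some 1)) ++ PySem.List.slice p (some 1) none

def denormalize_name_attr_alt (name : String) : String :=
  if name = "url" then "URL"
  else
    let l := name.toList
    -- name = name[0].upper() + name[1:]  (IndexError on "" — excluded by Pre_)
    let l := match PySem.List.pyGet? l 0 with
      | some c => PySem.Chars.upperChar c :: PySem.List.slice l (some 1) none
      | none => l
    String.ofList (PySem.Chars.join [] ((PySem.Chars.splitOn l ['_']).map denormB_capWord))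

-- ===== PRECONDITION & SPEC =====
-- Pre_ excludes only the empty string, on which both A and B raise IndexError.
def Pre_denormalize_name_attr (name : String) : Prop := name ≠ ""
instance (name : String) : Decidable (Pre_denormalize_name_attr name) := by unfold Pre_denormalize_name_attr; infer_instance
def pvWitness_denormalize_name_attr : String := "out_of_date"

def Spec_denormalize_name_attr (name : String) (out : String) : Prop := out = denormalize_name_attr_alt name
instance (name : String) (out : String) : Decidable (Spec_denormalize_name_attr name out) := by unfold Spec_denormalize_name_attr; infer_instance

-- ===== CLAIM (what is proved, stated in full; the proofs are below) =====
def Claim_equal_denormalize_name_attr : Prop := ∀ (name : String), Dom_denormalize_name_attr name → Pre_denormalize_name_attr name → Spec_denormalize_name_attr name (denormalize_name_attr name)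

-- ===== LEMMAS AND PROOFS =====

theorem islower_iff (c : Char) : PySem.Chars.islower c = true ↔ 97 ≤ c.toNat ∧ c.toNat ≤ 122 := by
  rw [PySem.Chars.islower]
  simp only [Bool.and_eq_true, decide_eq_true_eq, Char.le_def]
  rfl

theorem upperChar_toNat (c : Char) (h : PySem.Chars.islower c = true) :
    (PySem.Chars.upperChar c).toNat = c.toNat - 32 := by
  have h1 := (islower_iff c).mp h
  simp [PySem.Chars.upperChar, h, Char.toNat_ofNat, Nat.isValidChar]
  omega

theorem upperChar_ne_underscore (c : Char) (h : c ≠ '_') : PySem.Chars.upperChar c ≠ '_' := by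
  by_cases hl : PySem.Chars.islower c = true
  · have h1 := (islower_iff c).mp hl
    intro he
    have h2 := congrArg Char.toNat he
    rw [upperChar_toNat c hl] at h2
    have h95 : ('_').toNat = 95 := rfl
    omega
  · simpa [PySem.Chars.upperChar, hl] using h

theorem islower_upperChar (c : Char) : PySem.Chars.islower (PySem.Chars.upperChar c) = false := by
  by_cases hl : PySem.Chars.islower c = true
  · have h1 := (islower_iff c).mp hl
    have ht := upperChar_toNat c hl
    rw [Bool.eq_false_iff, Ne, islower_iff, ht]
    omega
  · rw [PySem.Chars.upperChar, if_neg (by simp [hl])]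
    simpa using hl

theorem upperChar_idem (c : Char) : PySem.Chars.upperChar (PySem.Chars.upperChar c) = PySem.Chars.upperChar c := by
  rw [PySem.Chars.upperChar, islower_upperChar]
  simp

theorem upperChar_underscore : PySem.Chars.upperChar '_' = '_' := by decide

-- the common reference function: capitalize after underscores (and the first char if `up`), drop underscores
def fB : Bool → List Char → List Char
  | _, [] => []
  | up, c :: r => if c = '_' then fB true r else (if up then PySem.Chars.upperChar c else c) :: fB false r

theorem fB_underscore (b : Bool) (t : List Char) : fB b ('_' :: t) = fB true t := by
  simp [fB]

theorem fB_upper_head (d : Char) (t : List Char) :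
    fB false (PySem.Chars.upperChar d :: t) = fB true (d :: t) := by
  by_cases hd : d = '_'
  · subst hd; rw [upperChar_underscore]; simp [fB]
  · simp [fB, if_neg (upperChar_ne_underscore d hd), if_neg hd]

-- A's loop computes fB false on the remaining suffix
theorem denormA_loop_eq (names : List Char) (i : Nat) (ret : List Char) :
    denormA_loop names i ret = ret ++ fB false (names.drop i) := by
  induction names, i, ret using denormA_loop.induct with
  | case1 names i ret h hc ih =>
      -- names[i] = '_'
      rw [denormA_loop, dif_pos h, if_pos hc, ih]
      have hdrop : names.drop i = names[i] :: names.drop (i + 1) := List.drop_eq_getElem_cons h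
      by_cases h2 : i + 1 < names.length
      · -- next char exists and is uppercased in place
        have hget : PySem.List.pyGet? names ((i : Int) + 1) = some names[i+1] := by
          have : ((i : Int) + 1) = ((i + 1 : Nat) : Int) := by push_cast; ring
          rw [this, PySem.List.pyGet?_natCast, List.getElem?_eq_getElem h2]
        have hset : denormA_setNext names i = names.set (i + 1) (PySem.Chars.upperChar names[i+1]) := by
          unfold denormA_setNext
          rw [hget]
          dsimp only
          have h1 : ((i : Int) + 1) = ((i + 1 : Nat) : Int) := by push_cast; ring
          rw [h1, PySem.List.pySetD_natCast]
        have hdrop' : (denormA_setNext names i).drop (i + 1) =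
            PySem.Chars.upperChar names[i+1] :: names.drop (i + 2) := by
          rw [hset]
          rw [List.drop_eq_getElem_cons (by simpa using h2)]
          congr 1
          · simp
          · rw [List.drop_set_of_lt (by omega : i + 1 < i + 1 + 1)]
        have hdrop2 : names.drop (i + 1) = names[i+1] :: names.drop (i + 2) :=
          List.drop_eq_getElem_cons h2
        rw [hdrop', hdrop, hc, hdrop2, fB_underscore, fB_upper_head]
      · -- i was the last index: try/except leaves the list unchanged, loop ends
        have hget : PySem.List.pyGet? names ((i : Int) + 1) = none := by
          have : ((i : Int) + 1) = ((i + 1 : Nat) : Int) := by push_cast; ring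
          rw [this, PySem.List.pyGet?_natCast, List.getElem?_eq_none (by omega)]
        have hset : denormA_setNext names i = names := by
          unfold denormA_setNext
          rw [hget]
        have hnil : names.drop (i + 1) = [] := List.drop_eq_nil_of_le (by omega)
        rw [hset, hdrop, hc, hnil, fB_underscore]
        simp [fB]
  | case2 names i ret h hc ih =>
      rw [denormA_loop, dif_pos h, if_neg hc, ih]
      have hdrop : names.drop i = names[i] :: names.drop (i + 1) := List.drop_eq_getElem_cons h
      rw [hdrop, fB, if_neg hc]
      simp
  | case3 names i ret h =>
      rw [denormA_loop, dif_neg h, List.drop_eq_nil_of_le (by omega), fB]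
      simp

-- reference splitter: what "_".split over a char list produces
def split1 : List Char → List (List Char)
  | [] => [[]]
  | c :: r => if c = '_' then [] :: split1 r
              else (c :: (split1 r).headI) :: (split1 r).tail

theorem split1_ne_nil (l : List Char) : split1 l ≠ [] := by
  cases l with
  | nil => simp [split1]
  | cons c r => rw [split1]; split_ifs <;> simp

theorem splitOn_go_eq (fuel : Nat) (l cur : List Char) (acc : List (List Char))
    (hf : l.length ≤ fuel) :
    PySem.Chars.splitOn.go ['_'] fuel l cur acc =
      acc.reverse ++ (split1 l).modifyHead (cur.reverse ++ ·) := by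
  induction fuel generalizing l cur acc with
  | zero =>
      have : l = [] := List.eq_nil_of_length_eq_zero (by omega)
      subst this
      simp [PySem.Chars.splitOn.go, split1]
  | succ f ih =>
      cases l with
      | nil => simp [PySem.Chars.splitOn.go, split1]
      | cons c rest =>
          rw [PySem.Chars.splitOn.go]
          by_cases hc : c = '_'
          · subst hc
            rw [if_pos (by simp [List.isPrefixOf])]
            simp only [List.length_singleton, List.drop_one, List.tail_cons]
            rw [ih rest [] (cur.reverse :: acc) (by simpa using Nat.lt_succ_iff.mp (by simpa using hf))]
            rw [split1, if_pos rfl]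
            cases hs : split1 rest with
            | nil => exact absurd hs (split1_ne_nil rest)
            | cons h t => simp
          · rw [if_neg (by simp [List.isPrefixOf]; exact fun he => hc he.symm)]
            rw [ih rest (c :: cur) acc (by simpa using Nat.lt_succ_iff.mp (by simpa using hf))]
            rw [split1, if_neg hc]
            cases hs : split1 rest with
            | nil => exact absurd hs (split1_ne_nil rest)
            | cons h t => simp

theorem splitOn_eq_split1 (l : List Char) : PySem.Chars.splitOn l ['_'] = split1 l := by
  rw [PySem.Chars.splitOn, splitOn_go_eq (l.length + 1) l [] [] (by omega)]
  cases hs : split1 l with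
  | nil => exact absurd hs (split1_ne_nil l)
  | cons h t => simp

-- capitalize-first-char, the meaning of p[:1].upper() + p[1:]
def capW : List Char → List Char
  | [] => []
  | c :: r => PySem.Chars.upperChar c :: r

theorem denormB_capWord_eq (p : List Char) : denormB_capWord p = capW p := by
  cases p with
  | nil => rfl
  | cons c r =>
      unfold denormB_capWord capW
      rw [PySem.List.slice_to (xs := c :: r) (b := 1) (by norm_num), PySem.List.slice_from_one]
      simp [PySem.Chars.upper]

theorem join_nil_eq_flatten (ps : List (List Char)) : PySem.Chars.join [] ps = ps.flatten := by
  induction ps with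
  | nil => simp [PySem.Chars.join_nil]
  | cons p rest ih =>
      cases rest with
      | nil => simp [PySem.Chars.join_singleton]
      | cons q t => rw [PySem.Chars.join_cons_cons, List.flatten_cons, ← ih]; simp

-- the split/capitalize/join pipeline equals fB true (with fB false for the tail after the head piece)
theorem flatten_cap_split1 (l : List Char) :
    ((split1 l).map capW).flatten = fB true l ∧
    (split1 l).headI ++ (((split1 l).tail).map capW).flatten = fB false l := by
  induction l with
  | nil => simp [split1, capW, fB]
  | cons c r ih =>
      by_cases hc : c = '_'
      · subst hc
        rw [split1, if_pos rfl]
        refine ⟨by simpa [capW] using ih.1, ?_⟩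
        rw [fB, if_pos rfl]
        simpa using ih.1
      · rw [split1, if_neg hc]
        cases hs : split1 r with
        | nil => exact absurd hs (split1_ne_nil r)
        | cons h t =>
            rw [hs] at ih
            constructor
            · rw [fB, if_neg hc, if_pos rfl]
              simp only [List.map_cons, List.flatten_cons, capW, List.headI, List.tail]
              rw [← ih.2]
              simp
            · rw [fB, if_neg hc]
              simp only [List.headI, List.tail]
              rw [← ih.2]
              simp

-- on a string whose first char was already uppercased, the initial `up` flag makes no difference
theorem fB_true_false_upper (c : Char) (r : List Char) :
    fB true (PySem.Chars.upperChar c :: r) = fB false (PySem.Chars.upperChar c :: r) := by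
  by_cases hc : PySem.Chars.upperChar c = '_'
  · rw [fB, fB, if_pos hc, if_pos hc]
  · simp [fB, hc, upperChar_idem]

-- ===== VERDICT (by name: the statement is the Claim_ definition above) =====
theorem denormalize_name_attr_spec : Claim_equal_denormalize_name_attr := by
  intro name _ hpre
  unfold Spec_denormalize_name_attr denormalize_name_attr denormalize_name_attr_alt
  by_cases hurl : name = "url"
  · rw [if_pos hurl, if_pos hurl]
  · rw [if_neg hurl, if_neg hurl]
    have hne : name.toList ≠ [] := by
      intro h
      exact hpre (String.toList_eq_nil_iff.mp h)
    obtain ⟨c, r, hcr⟩ := List.exists_cons_of_ne_nil hne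
    simp only [hcr]
    rw [PySem.List.pyGet?_zero_cons]
    simp only
    have hset0 : PySem.List.pySetD (c :: r) 0 (PySem.Chars.upperChar c) =
        PySem.Chars.upperChar c :: r := by
      have h0 : ((0 : Int)) = ((0 : Nat) : Int) := rfl
      rw [h0, PySem.List.pySetD_natCast]
      rfl
    rw [hset0, PySem.List.slice_from_one]
    simp only [List.tail_cons]
    rw [denormA_loop_eq, List.drop_zero, List.nil_append]
    congr 1
    rw [splitOn_eq_split1]
    rw [List.map_congr_left (fun p _ => denormB_capWord_eq p)]
    rw [join_nil_eq_flatten, (flatten_cap_split1 _).1, fB_true_false_upper]
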